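-- pv_equiv track=rewrite | github.com/abachu2005/AutoBarcoder | AutoBarcoder/barcode_processing/barcode_processor.py | reprint_with_common_barcodes
-- ===== SOURCE A (Python) =====
-- def reprint_with_common_barcodes(original_barcodes, clusters):
--     barcode_to_cluster = {}
--     cluster_list = []
--     for cluster in clusters:
--         for barcode in cluster:
--             barcode_to_cluster[barcode] = cluster
--     for original_barcode in original_barcodes:
--         if original_barcode in barcode_to_cluster:
--             cluster_list.append((barcode_to_cluster[original_barcode], original_barcode))
--         else:
--             cluster_list.append((set(), original_barcode))
--     return cluster_list
-- ===== SOURCE B (Python) =====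
-- def reprint_with_common_barcodes(original_barcodes, clusters):
--     result = []
--     for original_barcode in original_barcodes:
--         match = None
--         for cluster in clusters:
--             if original_barcode in cluster:
--                 match = cluster
--         result.append((match, original_barcode) if match is not None else (set(), original_barcode))
--     return result
-- ===== Notes on version B (the rewrite author's own statement) =====
-- stated objective: alternative
-- what changed: B drops the prebuilt barcode-to-cluster dict and instead, per original barcode, scans the clusters directly keeping the last cluster containing it (mirroring dict overwrite), appending (set(), barcode) when none matches.
import Mathlib
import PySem

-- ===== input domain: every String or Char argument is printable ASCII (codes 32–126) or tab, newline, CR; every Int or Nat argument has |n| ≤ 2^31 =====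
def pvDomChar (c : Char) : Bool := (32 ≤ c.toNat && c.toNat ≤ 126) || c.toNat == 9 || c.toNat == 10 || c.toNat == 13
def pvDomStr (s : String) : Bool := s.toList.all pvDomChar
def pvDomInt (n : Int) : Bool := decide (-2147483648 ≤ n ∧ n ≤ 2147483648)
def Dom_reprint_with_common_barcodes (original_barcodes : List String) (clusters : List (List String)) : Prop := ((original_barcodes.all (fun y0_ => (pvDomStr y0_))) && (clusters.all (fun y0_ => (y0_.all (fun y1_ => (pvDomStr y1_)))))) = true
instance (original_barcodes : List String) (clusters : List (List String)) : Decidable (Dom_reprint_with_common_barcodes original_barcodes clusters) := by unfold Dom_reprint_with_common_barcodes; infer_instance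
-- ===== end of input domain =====

-- ===== PORT A =====
def reprint_with_common_barcodes (original_barcodes : List String) (clusters : List (List String)) : List (List String × String) :=
  let barcode_to_cluster : PySem.Dict String (List String) :=
    clusters.foldl (fun d cluster =>
      cluster.foldl (fun d barcode => d.insert barcode cluster) d) PySem.Dict.empty
  original_barcodes.foldl (fun cluster_list original_barcode =>
    if barcode_to_cluster.contains original_barcode then
      cluster_list ++ [(barcode_to_cluster.getD original_barcode [], original_barcode)]
    else
      cluster_list ++ [([], original_barcode)]) []

-- ===== PORT B =====
def reprint_with_common_barcodes_alt (original_barcodes : List String) (clusters : List (List String)) : List (List String × String) :=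
  original_barcodes.map (fun original_barcode =>
    match clusters.foldl (fun m cluster =>
        if original_barcode ∈ cluster then some cluster else m) none with
    | some cluster => (cluster, original_barcode)
    | none => ([], original_barcode))

-- ===== PRECONDITION & SPEC =====
def Spec_reprint_with_common_barcodes (original_barcodes : List String) (clusters : List (List String)) (out : List (List String × String)) : Prop := out = reprint_with_common_barcodes_alt original_barcodes clusters
instance (original_barcodes : List String) (clusters : List (List String)) (out : List (List String × String)) : Decidable (Spec_reprint_with_common_barcodes original_barcodes clusters out) := by unfold Spec_reprint_with_common_barcodes; infer_instance

-- ===== CLAIM (what is proved, stated in full; the proofs are below) =====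
def Claim_equal_reprint_with_common_barcodes : Prop := ∀ (original_barcodes : List String) (clusters : List (List String)), Dom_reprint_with_common_barcodes original_barcodes clusters → Spec_reprint_with_common_barcodes original_barcodes clusters (reprint_with_common_barcodes original_barcodes clusters)

-- ===== LEMMAS AND PROOFS =====

-- inner loop of A's dict build: inserting every barcode of c with value c
lemma get?_foldl_insert_const (c : List String) (b : String) :
    ∀ (xs : List String) (d : PySem.Dict String (List String)),
      (xs.foldl (fun d x => d.insert x c) d).get? b
        = if b ∈ xs then some c else d.get? b := by
  intro xs
  induction xs with
  | nil => intro d; simp [List.foldl]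
  | cons x xs ih =>
      intro d
      simp only [List.foldl, ih]
      by_cases hxs : b ∈ xs
      · simp [hxs]
      · by_cases hbx : b = x
        · subst hbx; simp [hxs, PySem.Dict.get?_insert_self]
        · simp [hxs, hbx, PySem.Dict.get?_insert_of_ne _ _ hbx]

-- outer loop of A's dict build vs B's last-match fold
lemma get?_build_eq_lastMatch (b : String) :
    ∀ (cls : List (List String)) (d : PySem.Dict String (List String)),
      (cls.foldl (fun d cluster => cluster.foldl (fun d x => d.insert x cluster) d) d).get? b
        = cls.foldl (fun m cluster => if b ∈ cluster then some cluster else m) (d.get? b) := by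
  intro cls
  induction cls with
  | nil => intro d; simp [List.foldl]
  | cons c cls ih =>
      intro d
      simp only [List.foldl, ih, get?_foldl_insert_const]

-- A's accumulating append loop as a map, with a per-element rewrite of the payload
lemma foldl_append_ite (c : String → Bool) (f g h : String → List String × String)
    (hfg : ∀ b, (if c b then f b else g b) = h b) :
    ∀ (obs : List String) (acc : List (List String × String)),
      obs.foldl (fun acc b => if c b then acc ++ [f b] else acc ++ [g b]) acc
        = acc ++ obs.map h := by
  intro obs
  induction obs with
  | nil => intro acc; simp [List.foldl]
  | cons b obs ih =>
      intro acc
      simp only [List.foldl, List.map]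
      rw [show (if c b then acc ++ [f b] else acc ++ [g b]) = acc ++ [if c b then f b else g b]
            from by split <;> rfl, hfg b, ih, List.append_assoc]
      rfl

-- ===== VERDICT (by name: the statement is the Claim_ definition above) =====
theorem reprint_with_common_barcodes_spec : Claim_equal_reprint_with_common_barcodes := by
  intro obs cls _
  unfold Spec_reprint_with_common_barcodes reprint_with_common_barcodes reprint_with_common_barcodes_alt
  rw [foldl_append_ite _ _ _
        (fun original_barcode =>
          match cls.foldl (fun m cluster => if original_barcode ∈ cluster then some cluster else m) none with
          | some cluster => (cluster, original_barcode)
          | none => ([], original_barcode))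
        (fun b => by
          have h := get?_build_eq_lastMatch b cls PySem.Dict.empty
          rw [PySem.Dict.get?_empty] at h
          rw [PySem.Dict.contains_eq_isSome_get?, h, PySem.Dict.getD_eq_get?_getD, h]
          rcases hE : cls.foldl (fun m cluster => if b ∈ cluster then some cluster else m) none
            with _ | c <;> simp [hE])]
  simp
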